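-- pv_equiv track=rewrite | github.com/QzanY/CENG111 | other.py | helper3_lcs
-- ===== SOURCE A (Python) =====
-- def helper3_lcs(seq1,seq2,res):
--     if len(seq1)*len(seq2) == 0:
--         return res
--     else:
--         if seq1[0] == seq2[0]:
--             return helper3_lcs(seq1[1:],seq2[1:],res+seq1[0])
--         else:
--             return helper3_lcs(seq1[1:],seq2[1:],res)
-- ===== SOURCE B (Python) =====
-- def helper3_lcs(seq1, seq2, res):
--     return res + ''.join(a for a, b in zip(seq1, seq2) if a == b)
-- ===== Notes on version B (the rewrite author's own statement) =====
-- stated objective: faster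
-- what changed: Replaced the recursion with O(n) slice copies per step by a single linear zip pass joining the equal aligned characters onto res.
import Mathlib
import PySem

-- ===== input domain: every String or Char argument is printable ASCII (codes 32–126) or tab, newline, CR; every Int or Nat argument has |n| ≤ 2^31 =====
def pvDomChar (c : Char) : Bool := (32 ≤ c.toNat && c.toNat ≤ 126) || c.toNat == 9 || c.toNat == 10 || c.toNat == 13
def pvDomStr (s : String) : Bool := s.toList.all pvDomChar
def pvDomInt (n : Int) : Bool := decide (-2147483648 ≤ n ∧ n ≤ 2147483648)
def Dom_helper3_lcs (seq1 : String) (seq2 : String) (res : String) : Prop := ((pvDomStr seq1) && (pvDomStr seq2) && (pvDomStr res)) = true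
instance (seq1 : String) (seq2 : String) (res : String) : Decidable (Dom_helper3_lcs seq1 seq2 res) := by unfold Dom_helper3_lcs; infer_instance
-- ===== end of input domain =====

-- B replaces the quadratic slicing recursion by one linear zip-and-filter pass (faster).


-- ===== PORT A =====
-- A recurses: empty -> res; equal heads -> append head to res; recurse on tails.
def helper3A : List Char → List Char → List Char → List Char
  | [], _, res => res
  | _, [], res => res
  | c1 :: t1, c2 :: t2, res =>
      if c1 == c2 then helper3A t1 t2 (res ++ [c1]) else helper3A t1 t2 res

def helper3_lcs (seq1 : String) (seq2 : String) (res : String) : String :=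
  String.ofList (helper3A seq1.toList seq2.toList res.toList)

-- ===== PORT B =====
-- B: res + ''.join(a for a, b in zip(seq1, seq2) if a == b)
def helper3_lcs_alt (seq1 : String) (seq2 : String) (res : String) : String :=
  res ++ String.ofList ((((seq1.toList).zip (seq2.toList)).filter (fun p => p.1 == p.2)).map Prod.fst)

-- ===== PRECONDITION & SPEC =====
def Spec_helper3_lcs (seq1 : String) (seq2 : String) (res : String) (out : String) : Prop := out = helper3_lcs_alt seq1 seq2 res
instance (seq1 : String) (seq2 : String) (res : String) (out : String) : Decidable (Spec_helper3_lcs seq1 seq2 res out) := by unfold Spec_helper3_lcs; infer_instance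

-- ===== CLAIM (what is proved, stated in full; the proofs are below) =====
def Claim_equal_helper3_lcs : Prop := ∀ (seq1 : String) (seq2 : String) (res : String), Dom_helper3_lcs seq1 seq2 res → Spec_helper3_lcs seq1 seq2 res (helper3_lcs seq1 seq2 res)

-- ===== LEMMAS AND PROOFS =====

-- ===== VERDICT (by name: the statement is the Claim_ definition above) =====
theorem helper3A_eq (l1 l2 acc : List Char) :
    helper3A l1 l2 acc = acc ++ ((l1.zip l2).filter (fun p => p.1 == p.2)).map Prod.fst := by
  induction l1 generalizing l2 acc with
  | nil => simp [helper3A]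
  | cons c1 t1 ih =>
    cases l2 with
    | nil => simp [helper3A]
    | cons c2 t2 =>
      by_cases h : c1 == c2 <;> simp [helper3A, h, ih]

theorem helper3_lcs_spec : Claim_equal_helper3_lcs := by
  intro seq1 seq2 res _
  unfold Spec_helper3_lcs helper3_lcs helper3_lcs_alt
  rw [helper3A_eq]
  rw [String.ofList_append, String.ofList_toList]
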